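-- pv_equiv track=rewrite | github.com/MuhLibri/MST-Finder | src/Prim.py | isCircuit
-- ===== SOURCE A (Python) =====
-- def isCircuit(edge, mst):
--     node1Incident = False
--     node2Incident = False
--     i = 0
--
--     while ((not node1Incident) or (not node2Incident)) and (i < len(mst)):
--         if (edge[0] == mst[i][0] or edge[0] == mst[i][1]):
--             node1Incident = True
--         if (edge[1] == mst[i][0] or edge[1] == mst[i][1]):
--             node2Incident = True
--         i += 1
--
--     return (node1Incident and node2Incident)
-- ===== SOURCE B (Python) =====
-- def isCircuit(edge, mst):
--     nodes = set()
--     for e in mst: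
--         nodes.add(e[0])
--         nodes.add(e[1])
--     return edge[0] in nodes and edge[1] in nodes
-- ===== Notes on version B (the rewrite author's own statement) =====
-- stated objective: simpler
-- what changed: Replaces the two-flag short-circuit while loop over indices with building a set of all MST endpoints once and then testing membership of both edge endpoints.
import Mathlib
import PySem

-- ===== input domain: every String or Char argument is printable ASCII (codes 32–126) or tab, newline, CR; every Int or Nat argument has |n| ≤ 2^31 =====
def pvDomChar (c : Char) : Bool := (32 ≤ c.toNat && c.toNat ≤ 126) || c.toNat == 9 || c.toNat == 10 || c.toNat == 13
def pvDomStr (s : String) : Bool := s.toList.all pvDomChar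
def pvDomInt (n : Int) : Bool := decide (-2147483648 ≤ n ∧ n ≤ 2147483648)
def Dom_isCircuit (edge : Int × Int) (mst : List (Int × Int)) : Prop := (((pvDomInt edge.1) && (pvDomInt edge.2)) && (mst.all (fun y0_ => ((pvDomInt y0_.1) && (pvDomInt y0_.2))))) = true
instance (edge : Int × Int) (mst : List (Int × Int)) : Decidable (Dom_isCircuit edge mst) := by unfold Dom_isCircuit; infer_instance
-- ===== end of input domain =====

-- B replaces A's two-flag short-circuit scan by collecting all MST endpoints
-- into a set and testing membership of both edge endpoints (objective: simpler).

-- ===== PORT A =====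
-- the while loop: state (node1Incident, node2Incident), scanning mst left to right,
-- stopping early once both flags are true (faithful to the while condition)
def isCircuitLoop (edge : Int × Int) : List (Int × Int) → Bool → Bool → Bool
  | [], n1, n2 => n1 && n2
  | e :: rest, n1, n2 =>
    if (!n1 || !n2) then
      isCircuitLoop edge rest
        (if edge.1 == e.1 || edge.1 == e.2 then true else n1)
        (if edge.2 == e.1 || edge.2 == e.2 then true else n2)
    else n1 && n2

def isCircuit (edge : Int × Int) (mst : List (Int × Int)) : Bool :=
  isCircuitLoop edge mst false false

-- ===== PORT B =====
def isCircuit_alt (edge : Int × Int) (mst : List (Int × Int)) : Bool :=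
  let nodes : PySem.Set Int :=
    mst.foldl (fun s e => PySem.Set.add (PySem.Set.add s e.1) e.2) PySem.Set.empty
  PySem.Set.contains nodes edge.1 && PySem.Set.contains nodes edge.2

-- ===== PRECONDITION & SPEC =====
def Spec_isCircuit (edge : Int × Int) (mst : List (Int × Int)) (out : Bool) : Prop := out = isCircuit_alt edge mst
instance (edge : Int × Int) (mst : List (Int × Int)) (out : Bool) : Decidable (Spec_isCircuit edge mst out) := by unfold Spec_isCircuit; infer_instance

-- ===== CLAIM (what is proved, stated in full; the proofs are below) =====
def Claim_equal_isCircuit : Prop := ∀ (edge : Int × Int) (mst : List (Int × Int)), Dom_isCircuit edge mst → Spec_isCircuit edge mst (isCircuit edge mst)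

-- ===== LEMMAS AND PROOFS =====

theorem beq_int_def (a b : Int) : (a == b) = decide (a = b) := rfl

-- membership in the folded endpoint set
theorem mem_foldl_nodes (mst : List (Int × Int)) (s : PySem.Set Int) (x : Int) :
    x ∈ mst.foldl (fun s e => PySem.Set.add (PySem.Set.add s e.1) e.2) s ↔
      x ∈ s ∨ ∃ e ∈ mst, x = e.1 ∨ x = e.2 := by
  induction mst generalizing s with
  | nil => simp
  | cons e rest ih =>
    simp [List.foldl, ih, PySem.Set.mem_add]
    aesop

-- the built set contains x iff some MST edge has x as an endpoint
theorem mem_nodes_decide (mst : List (Int × Int)) (x : Int) :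
    decide (x ∈ mst.foldl (fun s e => PySem.Set.add (PySem.Set.add s e.1) e.2) []) =
      mst.any (fun e => x == e.1 || x == e.2) := by
  rw [Bool.eq_iff_iff]
  simp [mem_foldl_nodes mst ([] : PySem.Set Int) x, List.any_eq_true, beq_int_def]

-- the loop computes (n1 || any endpoint hit) && (n2 || …)
theorem isCircuitLoop_eq (edge : Int × Int) (mst : List (Int × Int)) (n1 n2 : Bool) :
    isCircuitLoop edge mst n1 n2 =
      ((n1 || mst.any (fun e => edge.1 == e.1 || edge.1 == e.2)) &&
       (n2 || mst.any (fun e => edge.2 == e.1 || edge.2 == e.2))) := by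
  induction mst generalizing n1 n2 with
  | nil => simp [isCircuitLoop]
  | cons e rest ih =>
    by_cases h : (!n1 || !n2) = true
    · simp only [isCircuitLoop, h, if_pos, ih]
      cases n1 <;> cases n2 <;> simp_all [beq_int_def]
    · have h1 : n1 = true := by cases n1 <;> simp_all
      have h2 : n2 = true := by cases n2 <;> simp_all
      subst h1 h2
      simp [isCircuitLoop]

-- ===== VERDICT (by name: the statement is the Claim_ definition above) =====
theorem isCircuit_spec : Claim_equal_isCircuit := by
  intro edge mst _
  unfold Spec_isCircuit isCircuit isCircuit_alt
  rw [isCircuitLoop_eq]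
  simp only [Bool.false_or]
  simp [PySem.Set.contains, PySem.Set.empty]
  rw [mem_nodes_decide, mem_nodes_decide]
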